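-- pv_equiv track=rewrite | github.com/ToshiyaTsubonishi/ai-config | src/ai_config/registry/script_parser.py | _extract_shell_doc
-- ===== SOURCE A (Python) =====
-- def _first_sentence(text: str, fallback: str) -> str:
--     line = text.strip().splitlines()[0].strip() if text.strip() else ""
--     if not line:
--         return fallback
--     return line[:300]
--
-- def _extract_shell_doc(text: str, fallback: str) -> str:
--     lines = text.splitlines()
--     comments: list[str] = []
--     for i, line in enumerate(lines):
--         stripped = line.strip()
--         if i == 0 and stripped.startswith("#!"):
--             continue
--         if stripped.startswith("#"):
--             comments.append(stripped.lstrip("#").strip())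
--             continue
--         if comments:
--             break
--         if stripped:
--             break
--     return _first_sentence("\n".join(comments), fallback) if comments else fallback
-- ===== SOURCE B (Python) =====
-- def _extract_shell_doc(text: str, fallback: str) -> str:
--     # Recursive short-circuit: return the first nonempty comment content directly,
--     # instead of accumulating a comments list, joining it and re-splitting it.
--     def doc(lines, in_block):
--         if not lines:
--             return fallback
--         s = lines[0].strip()
--         if s.startswith("#"):
--             content = s.lstrip("#").strip()
--             return content[:300] if content else doc(lines[1:], True)
--         if in_block or s:
--             return fallback
--         return doc(lines[1:], False)
--
--     lines = text.splitlines()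
--     if lines and lines[0].strip().startswith("#!"):
--         lines = lines[1:]
--     return doc(lines, False)
-- ===== Notes on version B (the rewrite author's own statement) =====
-- stated objective: alternative
-- what changed: A accumulates a comments list, joins it with newlines and re-splits it through _first_sentence; B is a recursive short-circuit scan that returns the first nonempty comment content (capped at 300 chars) directly, never building the list, the joined string or calling _first_sentence.
import Mathlib
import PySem

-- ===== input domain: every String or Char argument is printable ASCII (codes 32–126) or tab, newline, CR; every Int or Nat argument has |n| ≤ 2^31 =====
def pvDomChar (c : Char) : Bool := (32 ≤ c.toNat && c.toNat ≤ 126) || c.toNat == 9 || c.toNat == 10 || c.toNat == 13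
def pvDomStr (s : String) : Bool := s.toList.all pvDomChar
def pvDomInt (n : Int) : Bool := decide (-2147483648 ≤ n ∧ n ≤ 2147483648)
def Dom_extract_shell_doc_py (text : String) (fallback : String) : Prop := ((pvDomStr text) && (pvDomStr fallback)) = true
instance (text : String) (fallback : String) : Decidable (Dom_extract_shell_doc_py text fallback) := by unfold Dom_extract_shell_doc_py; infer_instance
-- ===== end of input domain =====

-- B replaces A's accumulate-join-and-resplit pipeline (comments list, "\n".join, _first_sentence)
-- by a recursive short-circuit scan that returns the first nonempty comment content directly; same cost, simpler data flow.

-- exact port of Python s.lstrip("#"): drop leading '#' characters (shared helper of both Pythons)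
def pyLstripHash (s : String) : String := String.ofList (s.toList.dropWhile (· == '#'))

-- ===== PORT A =====
-- port of _first_sentence (helper of A)
def first_sentence_py (text : String) (fallback : String) : String :=
  let line : String :=
    if PySem.Str.strip text ≠ "" then
      PySem.Str.strip ((PySem.Str.splitlines (PySem.Str.strip text)).headD "")
    else ""
  if line = "" then fallback
  else PySem.Str.slice line none (some 300)

def aLoop (lines : List String) (i : Nat) (comments : List String) : List String :=
  match lines with
  | [] => comments
  | line :: rest =>
    -- stripped := line.strip(), inlined
    if i = 0 ∧ PySem.Str.startswith (PySem.Str.strip line) "#!" then aLoop rest (i+1) comments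
    else if PySem.Str.startswith (PySem.Str.strip line) "#" then
      aLoop rest (i+1) (comments ++ [PySem.Str.strip (pyLstripHash (PySem.Str.strip line))])
    else if comments ≠ [] then comments
    else if (PySem.Str.strip line) ≠ "" then comments
    else aLoop rest (i+1) comments

def extract_shell_doc_py (text : String) (fallback : String) : String :=
  let lines := PySem.Str.splitlines text
  let comments := aLoop lines 0 []
  if comments ≠ [] then first_sentence_py (PySem.Str.join "\n" comments) fallback
  else fallback

-- ===== PORT B =====
-- the inner recursive helper doc(lines, in_block) of Source B
def bDoc (lines : List String) (inBlock : Bool) (fallback : String) : String :=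
  match lines with
  | [] => fallback
  | l :: rest =>
    let s := PySem.Str.strip l
    if PySem.Str.startswith s "#" then
      let content := PySem.Str.strip (pyLstripHash s)
      if content ≠ "" then PySem.Str.slice content none (some 300)
      else bDoc rest true fallback
    else if inBlock || s ≠ "" then fallback
    else bDoc rest false fallback

def extract_shell_doc_py_alt (text : String) (fallback : String) : String :=
  let lines := PySem.Str.splitlines text
  let lines1 : List String :=
    match lines with
    | [] => []
    | l0 :: rest => if PySem.Str.startswith (PySem.Str.strip l0) "#!" then rest else l0 :: rest
  bDoc lines1 false fallback

-- ===== PRECONDITION & SPEC =====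
def Spec_extract_shell_doc_py (text : String) (fallback : String) (out : String) : Prop := out = extract_shell_doc_py_alt text fallback
instance (text : String) (fallback : String) (out : String) : Decidable (Spec_extract_shell_doc_py text fallback out) := by unfold Spec_extract_shell_doc_py; infer_instance

-- ===== CLAIM (what is proved, stated in full; the proofs are below) =====
def Claim_equal_extract_shell_doc_py : Prop := ∀ (text : String) (fallback : String), Dom_extract_shell_doc_py text fallback → Spec_extract_shell_doc_py text fallback (extract_shell_doc_py text fallback)

-- ===== LEMMAS AND PROOFS =====

theorem strip_ne_empty_of_startswith_hash (l : String)
    (h : PySem.Str.startswith (PySem.Str.strip l) "#" = true) :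
    ¬ (PySem.Str.strip l == "") = true := by
  intro hb
  rw [beq_iff_eq] at hb
  rw [hb] at h
  simp [PySem.Str.startswith] at h
  have := (PySem.Chars.startswith_iff _ _).1 h
  simp at this

-- once comments is nonempty, A's loop is a takeWhile + map
theorem aLoop_nonempty (ls : List String) (i : Nat) (acc : List String) (hacc : acc ≠ []) :
    aLoop ls (i+1) acc =
      acc ++ (ls.takeWhile (fun l => PySem.Str.startswith (PySem.Str.strip l) "#")).map
        (fun l => PySem.Str.strip (pyLstripHash (PySem.Str.strip l))) := by
  induction ls generalizing i acc with
  | nil => rw [aLoop, List.takeWhile_nil, List.map_nil, List.append_nil]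
  | cons l rest ih =>
    rw [aLoop, if_neg (by simp), List.takeWhile_cons]
    by_cases hp : PySem.Str.startswith (PySem.Str.strip l) "#" = true
    · rw [if_pos hp, if_pos hp, ih (i+1) _ (by simp), List.map_cons]
      simp only [List.append_assoc, List.singleton_append]
    · rw [if_neg hp, if_pos hacc, if_neg hp, List.map_nil, List.append_nil]

-- with comments empty (and past line 0), A's loop is dropWhile blanks then takeWhile comments
theorem aLoop_empty (ls : List String) (i : Nat) :
    aLoop ls (i+1) [] =
      ((ls.dropWhile (fun l => PySem.Str.strip l == "")).takeWhile
          (fun l => PySem.Str.startswith (PySem.Str.strip l) "#")).map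
        (fun l => PySem.Str.strip (pyLstripHash (PySem.Str.strip l))) := by
  induction ls generalizing i with
  | nil => rw [aLoop, List.dropWhile_nil, List.takeWhile_nil, List.map_nil]
  | cons l rest ih =>
    rw [aLoop, if_neg (by simp), List.dropWhile_cons]
    by_cases hp : PySem.Str.startswith (PySem.Str.strip l) "#" = true
    · rw [if_pos hp, if_neg (strip_ne_empty_of_startswith_hash l hp),
        List.takeWhile_cons, if_pos hp, aLoop_nonempty rest (i+1) _ (by simp),
        List.map_cons]
      simp
    · rw [if_neg hp, if_neg (show ¬ (([]:List String) ≠ []) by simp)]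
      by_cases hb : (PySem.Str.strip l == "") = true
      · rw [if_neg (fun h => h (by simpa using hb)), ih (i+1), if_pos hb]
      · rw [if_pos (show PySem.Str.strip l ≠ "" by simpa using hb), if_neg hb,
          List.takeWhile_cons, if_neg hp, List.map_nil]

theorem aLoop_eq_alt (ls : List String) :
    aLoop ls 0 [] =
      (((match ls with
          | [] => []
          | l0 :: rest => if PySem.Str.startswith (PySem.Str.strip l0) "#!" then rest else l0 :: rest
         : List String).dropWhile (fun l => PySem.Str.strip l == "")).takeWhile
          (fun l => PySem.Str.startswith (PySem.Str.strip l) "#")).map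
        (fun l => PySem.Str.strip (pyLstripHash (PySem.Str.strip l))) := by
  match ls with
  | [] => rw [aLoop]; rw [List.dropWhile_nil, List.takeWhile_nil, List.map_nil]
  | l0 :: rest =>
    by_cases hs : PySem.Str.startswith (PySem.Str.strip l0) "#!" = true
    · rw [aLoop, if_pos ⟨rfl, hs⟩, aLoop_empty rest 0]
      simp only [hs, if_true]
    · simp only [hs, Bool.false_eq_true, if_false]
      rw [aLoop, if_neg (fun h => hs h.2), List.dropWhile_cons]
      by_cases hp : PySem.Str.startswith (PySem.Str.strip l0) "#" = true
      · rw [if_pos hp, if_neg (strip_ne_empty_of_startswith_hash l0 hp),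
          List.takeWhile_cons, if_pos hp, aLoop_nonempty rest 0 _ (by simp),
          List.map_cons]
        simp
      · rw [if_neg hp, if_neg (show ¬ (([]:List String) ≠ []) by simp)]
        by_cases hb : (PySem.Str.strip l0 == "") = true
        · rw [if_neg (fun h => h (by simpa using hb)), aLoop_empty rest 0, if_pos hb]
        · rw [if_pos (show PySem.Str.strip l0 ≠ "" by simpa using hb), if_neg hb,
            List.takeWhile_cons, if_neg hp, List.map_nil]

-- ---- proof-side helpers ----

-- the line-break predicate of PySem.Chars.splitlines
def pvBrk (c : Char) : Bool :=
  have n := c.toNat;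
  decide (n = 10) || decide (n = 13) || decide (n = 11) || decide (n = 12) || decide (n = 28) || decide (n = 29) ||
    decide (n = 30) || decide (n = 133) || decide (n = 8232) || decide (n = 8233)

theorem splitlines_eq_go (s : List Char) :
    PySem.Chars.splitlines s = PySem.Chars.splitlines.go pvBrk s [] [] := rfl

theorem go_nil (cur : List Char) (acc : List (List Char)) :
    PySem.Chars.splitlines.go pvBrk [] cur acc =
      (if cur.isEmpty then acc.reverse else (cur.reverse :: acc).reverse) := rfl

theorem go_rn (s cur : List Char) (acc : List (List Char)) :
    PySem.Chars.splitlines.go pvBrk ('\x0d' :: '\n' :: s) cur acc =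
      PySem.Chars.splitlines.go pvBrk s [] (cur.reverse :: acc) := rfl

theorem go_cons (c : Char) (s cur : List Char) (acc : List (List Char)) (hc : c ≠ '\x0d') :
    PySem.Chars.splitlines.go pvBrk (c :: s) cur acc =
    (if pvBrk c then PySem.Chars.splitlines.go pvBrk s [] (cur.reverse :: acc)
     else PySem.Chars.splitlines.go pvBrk s (c :: cur) acc) := by
  rw [PySem.Chars.splitlines.go.eq_def]
  split
  · next heq => exact absurd heq (by simp)
  · next rest heq => exact absurd (List.cons_eq_cons.mp heq).1 hc
  · next c' rest heq =>
      obtain ⟨h1, h2⟩ := List.cons_eq_cons.mp heq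
      subst h1; subst h2; rfl

theorem go_cr (c2 : Char) (s cur : List Char) (acc : List (List Char)) (h2 : c2 ≠ '\n') :
    PySem.Chars.splitlines.go pvBrk ('\x0d' :: c2 :: s) cur acc =
      PySem.Chars.splitlines.go pvBrk (c2 :: s) [] (cur.reverse :: acc) := by
  rw [PySem.Chars.splitlines.go.eq_def]
  split
  · next heq => exact absurd heq (by simp)
  · next rest heq => exact absurd (List.cons_eq_cons.mp heq).2 (by intro h; exact h2 (List.cons_eq_cons.mp h).1)
  · next c' rest heq =>
      obtain ⟨h1, h2'⟩ := List.cons_eq_cons.mp heq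
      subst h1; subst h2'
      rw [if_pos (by decide : pvBrk '\x0d' = true)]

theorem go_append_nobreak (cL : List Char) (hnb : ∀ ch ∈ cL, pvBrk ch = false) :
    ∀ (s cur : List Char) (acc : List (List Char)),
      PySem.Chars.splitlines.go pvBrk (cL ++ s) cur acc =
        PySem.Chars.splitlines.go pvBrk s (cL.reverse ++ cur) acc := by
  induction cL with
  | nil => intro s cur acc; simp
  | cons ch cL' ih =>
    intro s cur acc
    have hch : pvBrk ch = false := hnb ch (List.mem_cons_self ..)
    have hcr : ch ≠ '\x0d' := by intro h; subst h; exact absurd hch (by decide)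
    rw [List.cons_append, go_cons ch _ _ _ hcr, if_neg (by simp [hch]),
      ih (fun c hc => hnb c (List.mem_cons_of_mem _ hc))]
    simp

theorem go_headD (a d : List Char) :
    ∀ (n : Nat) (s cur : List Char) (acc : List (List Char)), s.length ≤ n →
      (PySem.Chars.splitlines.go pvBrk s cur (acc ++ [a])).headD d = a := by
  intro n
  induction n with
  | zero =>
    intro s cur acc hs
    rw [List.length_eq_zero_iff.mp (Nat.le_zero.mp hs), go_nil]
    split <;> simp
  | succ n ih =>
    intro s cur acc hs
    match s with
    | [] => rw [go_nil]; split <;> simp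
    | c :: s' =>
      by_cases hc : c = '\x0d'
      · subst hc
        match s' with
        | [] =>
          rw [show PySem.Chars.splitlines.go pvBrk ['\x0d'] cur (acc ++ [a]) =
              PySem.Chars.splitlines.go pvBrk [] [] (cur.reverse :: (acc ++ [a])) from rfl]
          rw [show cur.reverse :: (acc ++ [a]) = (cur.reverse :: acc) ++ [a] from rfl]
          exact ih [] [] _ (by simp)
        | c2 :: s'' =>
          by_cases h2 : c2 = '\n'
          · subst h2
            rw [go_rn, show cur.reverse :: (acc ++ [a]) = (cur.reverse :: acc) ++ [a] from rfl]
            exact ih s'' [] _ (by simp at hs; omega)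
          · rw [go_cr c2 s'' cur _ h2,
              show cur.reverse :: (acc ++ [a]) = (cur.reverse :: acc) ++ [a] from rfl]
            exact ih (c2 :: s'') [] _ (by simp at hs; simp; omega)
      · rw [go_cons c s' cur _ hc]
        have hlen : s'.length ≤ n := by simp at hs; omega
        split
        · rw [show cur.reverse :: (acc ++ [a]) = (cur.reverse :: acc) ++ [a] from rfl]
          exact ih s' [] _ hlen
        · exact ih s' _ _ hlen

theorem go_nobreak_pieces :
    ∀ (n : Nat) (s cur : List Char) (acc : List (List Char)), s.length ≤ n →
      (∀ ch ∈ cur, pvBrk ch = false) →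
      (∀ p ∈ acc, ∀ ch ∈ p, pvBrk ch = false) →
      ∀ p ∈ PySem.Chars.splitlines.go pvBrk s cur acc, ∀ ch ∈ p, pvBrk ch = false := by
  intro n
  induction n with
  | zero =>
    intro s cur acc hs hcur hacc
    rw [List.length_eq_zero_iff.mp (Nat.le_zero.mp hs), go_nil]
    split
    · intro p hp; exact hacc p (List.mem_reverse.mp hp)
    · intro p hp ch hch
      rcases List.mem_cons.mp (List.mem_reverse.mp hp) with rfl | hp'
      · exact hcur ch (List.mem_reverse.mp hch)
      · exact hacc p hp' ch hch
  | succ n ih =>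
    intro s cur acc hs hcur hacc
    have haccx : ∀ p ∈ (cur.reverse :: acc), ∀ ch ∈ p, pvBrk ch = false := by
      intro p hp ch hch
      rcases List.mem_cons.mp hp with rfl | hp'
      · exact hcur ch (List.mem_reverse.mp hch)
      · exact hacc p hp' ch hch
    match s with
    | [] =>
      rw [go_nil]
      split
      · intro p hp; exact hacc p (List.mem_reverse.mp hp)
      · intro p hp ch hch
        rcases List.mem_cons.mp (List.mem_reverse.mp hp) with rfl | hp'
        · exact hcur ch (List.mem_reverse.mp hch)
        · exact hacc p hp' ch hch
    | c :: s' =>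
      by_cases hc : c = '\x0d'
      · subst hc
        match s' with
        | [] =>
          rw [show PySem.Chars.splitlines.go pvBrk ['\x0d'] cur acc =
              PySem.Chars.splitlines.go pvBrk [] [] (cur.reverse :: acc) from rfl]
          exact ih [] [] _ (by simp) (by simp) haccx
        | c2 :: s'' =>
          by_cases h2 : c2 = '\n'
          · subst h2
            rw [go_rn]
            exact ih s'' [] _ (by simp at hs; omega) (by simp) haccx
          · rw [go_cr c2 s'' cur _ h2]
            exact ih (c2 :: s'') [] _ (by simp at hs; simp; omega) (by simp) haccx
      · rw [go_cons c s' cur _ hc]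
        have hlen : s'.length ≤ n := by simp at hs; omega
        split
        · next hbc => exact ih s' [] _ hlen (by simp) haccx
        · next hbc =>
          refine ih s' (c :: cur) _ hlen ?_ hacc
          intro ch hch
          rcases List.mem_cons.mp hch with rfl | hch'
          · exact Bool.not_eq_true _ ▸ (by simpa using hbc)
          · exact hcur ch hch'

theorem splitlines_nobreak (s : List Char) :
    ∀ p ∈ PySem.Chars.splitlines s, ∀ ch ∈ p, pvBrk ch = false := by
  rw [splitlines_eq_go]
  exact go_nobreak_pieces s.length s [] [] le_rfl (by simp) (by simp)

-- first element of splitlines of "no-break block ++ (nothing or a \n-tail)"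
theorem splitlines_headD (cL rest' : List Char) (hne : cL ≠ [])
    (hnb : ∀ ch ∈ cL, pvBrk ch = false)
    (hr : rest' = [] ∨ ∃ r, rest' = '\n' :: r) :
    (PySem.Chars.splitlines (cL ++ rest')).headD [] = cL := by
  rw [splitlines_eq_go, go_append_nobreak cL hnb rest' [] []]
  rcases hr with rfl | ⟨r, rfl⟩
  · rw [go_nil]
    rw [if_neg (by simpa using hne)]
    simp
  · rw [go_cons '\n' r _ _ (by decide), if_pos (by decide)]
    simpa using go_headD cL [] r.length r [] [] le_rfl

-- ---- facts about strip / dropWhile ----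

theorem dropWhile_eq_self_of_prefix {p : Char → Bool} {w z : List Char}
    (hz : List.dropWhile p z = z) (hw : w <+: z) : List.dropWhile p w = w := by
  match w with
  | [] => rfl
  | x :: w' =>
    obtain ⟨u, hu⟩ := hw
    have hz' : z = x :: (w' ++ u) := by rw [← hu]; rfl
    subst hz'
    rw [List.dropWhile_cons] at hz ⊢
    by_cases hp : p x = true
    · rw [if_pos hp] at hz
      have := List.length_dropWhile_le p (w' ++ u)
      rw [hz] at this; simp at this
    · rw [if_neg hp]

theorem rstrip_prefix (z : List Char) : PySem.Chars.rstrip z <+: z := by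
  have h := List.dropWhile_suffix (l := z.reverse) PySem.Chars.isspace
  have := List.reverse_prefix.mpr (by simpa using h)
  simpa [PySem.Chars.rstrip] using this

theorem mem_of_mem_strip {ch : Char} {x : List Char} (h : ch ∈ PySem.Chars.strip x) : ch ∈ x := by
  simp only [PySem.Chars.strip, PySem.Chars.rstrip, PySem.Chars.lstrip, List.mem_reverse] at h
  exact (List.dropWhile_sublist _).subset
    (List.mem_reverse.mp ((List.dropWhile_sublist _).subset h))

-- the three invariants of every comment content string
def Pstr (c : String) : Prop :=
  List.dropWhile PySem.Chars.isspace c.toList = c.toList ∧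
  List.dropWhile PySem.Chars.isspace c.toList.reverse = c.toList.reverse ∧
  ∀ ch ∈ c.toList, pvBrk ch = false

theorem Pstr_content (l : String) (hnb : ∀ ch ∈ l.toList, pvBrk ch = false) :
    Pstr (PySem.Str.strip (pyLstripHash (PySem.Str.strip l))) := by
  have htl : (PySem.Str.strip (pyLstripHash (PySem.Str.strip l))).toList =
      PySem.Chars.strip (List.dropWhile (· == '#') (PySem.Chars.strip l.toList)) := by
    simp [pyLstripHash, PySem.Str.toList_strip, String.toList_ofList]
  set y := List.dropWhile (· == '#') (PySem.Chars.strip l.toList) with hy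
  have hz : List.dropWhile PySem.Chars.isspace (PySem.Chars.lstrip y) = PySem.Chars.lstrip y := by
    simp [PySem.Chars.lstrip, List.dropWhile_idempotent]
  refine ⟨?_, ?_, ?_⟩
  · rw [htl]
    show List.dropWhile PySem.Chars.isspace (PySem.Chars.rstrip (PySem.Chars.lstrip y)) = _
    exact dropWhile_eq_self_of_prefix hz (rstrip_prefix _)
  · rw [htl]
    have hx : (PySem.Chars.strip y).reverse = List.dropWhile PySem.Chars.isspace (PySem.Chars.lstrip y).reverse := by
      show (PySem.Chars.rstrip (PySem.Chars.lstrip y)).reverse = _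
      simp [PySem.Chars.rstrip]
    rw [hx, List.dropWhile_idempotent]
  · intro ch hch
    rw [htl] at hch
    have h1 : ch ∈ y := mem_of_mem_strip hch
    have h2 : ch ∈ PySem.Chars.strip l.toList := (List.dropWhile_sublist _).subset h1
    exact hnb ch (mem_of_mem_strip h2)

-- first_sentence depends on its argument only through its strip
theorem fs_congr (s s' fb : String) (h : PySem.Str.strip s = PySem.Str.strip s') :
    first_sentence_py s fb = first_sentence_py s' fb := by
  simp only [first_sentence_py, h]

-- strip of "no-break block ++ (nothing or a \n-tail)" keeps the block and a tail of the same shape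
theorem strip_shape (cL rest : List Char) (hne : cL ≠ [])
    (h1 : List.dropWhile PySem.Chars.isspace cL = cL)
    (h2 : List.dropWhile PySem.Chars.isspace cL.reverse = cL.reverse)
    (hr : rest = [] ∨ ∃ t, rest = '\n' :: t) :
    ∃ rest', PySem.Chars.strip (cL ++ rest) = cL ++ rest' ∧ (rest' = [] ∨ ∃ r, rest' = '\n' :: r) := by
  match cL with
  | [] => exact absurd rfl hne
  | ch :: cL' =>
    have hsp : PySem.Chars.isspace ch = false := by
      by_contra hx
      rw [List.dropWhile_cons, if_pos (by simpa using hx)] at h1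
      have := List.length_dropWhile_le PySem.Chars.isspace cL'
      rw [h1] at this; simp at this
    have hlstrip : PySem.Chars.lstrip ((ch :: cL') ++ rest) = (ch :: cL') ++ rest := by
      simp [PySem.Chars.lstrip, hsp]
    rw [show PySem.Chars.strip ((ch :: cL') ++ rest) =
        PySem.Chars.rstrip (PySem.Chars.lstrip ((ch :: cL') ++ rest)) from rfl, hlstrip]
    rw [show PySem.Chars.rstrip ((ch :: cL') ++ rest) =
        (List.dropWhile PySem.Chars.isspace (rest.reverse ++ (ch :: cL').reverse)).reverse by
      simp [PySem.Chars.rstrip]]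
    rw [List.dropWhile_append]
    by_cases hemp : (List.dropWhile PySem.Chars.isspace rest.reverse).isEmpty = true
    · rw [if_pos hemp, h2]
      exact ⟨[], by simp, Or.inl rfl⟩
    · rw [if_neg hemp]
      refine ⟨(List.dropWhile PySem.Chars.isspace rest.reverse).reverse, by simp, ?_⟩
      right
      have hrest_ne : rest ≠ [] := by
        intro h; subst h; simp at hemp
      obtain ⟨t, rfl⟩ := hr.resolve_left hrest_ne
      have hpre : (List.dropWhile PySem.Chars.isspace ('\n'::t).reverse).reverse <+: ('\n'::t) := by
        have h := List.dropWhile_suffix (l := ('\n'::t).reverse) PySem.Chars.isspace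
        have := List.reverse_prefix.mpr (by simpa using h)
        simpa using this
      obtain ⟨u, hu⟩ := hpre
      rcases hw : (List.dropWhile PySem.Chars.isspace ('\n' :: t).reverse).reverse with _ | ⟨x, r'⟩
      · rw [List.reverse_eq_nil_iff] at hw
        rw [hw] at hemp
        simp at hemp
      · rw [hw] at hu
        have hx : x = '\n' := (List.cons_eq_cons.mp (by simpa using hu)).1
        exact ⟨r', by rw [hx]⟩

-- join helpers at the Str level
theorem join_toList_single (c : String) :
    (PySem.Str.join "\n" [c]).toList = c.toList := by
  show (String.ofList (PySem.Chars.join "\n".toList (List.map String.toList [c]))).toList = _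
  simp [PySem.Chars.join_singleton]

theorem join_toList_cons (c c2 : String) (cs' : List String) :
    (PySem.Str.join "\n" (c :: c2 :: cs')).toList =
      c.toList ++ ('\n' :: (PySem.Str.join "\n" (c2 :: cs')).toList) := by
  show (String.ofList (PySem.Chars.join "\n".toList (List.map String.toList (c :: c2 :: cs')))).toList = _
  rw [String.toList_ofList, List.map_cons, List.map_cons, PySem.Chars.join_cons_cons]
  show _ = c.toList ++ ('\n' :: (String.ofList (PySem.Chars.join "\n".toList (c2.toList :: List.map String.toList cs'))).toList)
  simp [String.toList_ofList, List.append_assoc]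

theorem toList_ne_nil_of_ne (c : String) (h : c ≠ "") : c.toList ≠ [] := by
  intro hx
  exact h (String.toList_eq_nil_iff.mp hx)

-- the core of the head case, over an abstract tail
theorem fs_core (T c : String) (rest : List Char) (fb : String)
    (hP : Pstr c) (hne : c ≠ "")
    (hjt : T.toList = c.toList ++ rest)
    (hrshape : rest = [] ∨ ∃ t, rest = '\n' :: t) :
    first_sentence_py T fb = PySem.Str.slice c none (some 300) := by
  obtain ⟨hP1, hP2, hP3⟩ := hP
  have hcl : c.toList ≠ [] := toList_ne_nil_of_ne c hne
  obtain ⟨rest', hstrip, hrs'⟩ := strip_shape c.toList rest hcl hP1 hP2 hrshape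
  have hstripS : PySem.Str.strip T = String.ofList (c.toList ++ rest') := by
    show String.ofList (PySem.Chars.strip T.toList) = _
    rw [hjt, hstrip]
  have hstripne : PySem.Str.strip T ≠ "" := by
    rw [hstripS]
    intro h
    have h2 := congrArg String.toList h
    rw [String.toList_ofList] at h2
    have h3 : c.toList ++ rest' = [] := by simpa using h2
    exact hcl (List.append_eq_nil_iff.mp h3).1
  have hstripc : PySem.Chars.strip c.toList = c.toList := by
    show PySem.Chars.rstrip (PySem.Chars.lstrip c.toList) = c.toList
    have hls : PySem.Chars.lstrip c.toList = c.toList := hP1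
    rw [hls]
    show (List.dropWhile PySem.Chars.isspace c.toList.reverse).reverse = c.toList
    rw [hP2, List.reverse_reverse]
  have hline : PySem.Str.strip ((PySem.Str.splitlines (PySem.Str.strip T)).headD "") = c := by
    rw [hstripS]
    have hsl : PySem.Str.splitlines (String.ofList (c.toList ++ rest')) =
        List.map String.ofList (PySem.Chars.splitlines (c.toList ++ rest')) := by
      simp [PySem.Str.splitlines, String.toList_ofList]
    rw [hsl]
    have hhd := splitlines_headD c.toList rest' hcl hP3 hrs'
    have hmap : (List.map String.ofList (PySem.Chars.splitlines (c.toList ++ rest'))).headD "" =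
        String.ofList ((PySem.Chars.splitlines (c.toList ++ rest')).headD []) := by
      match PySem.Chars.splitlines (c.toList ++ rest') with
      | [] => rfl
      | p :: ps => rfl
    rw [hmap, hhd]
    show String.ofList (PySem.Chars.strip (String.ofList c.toList).toList) = c
    rw [String.toList_ofList, hstripc, String.ofList_toList]
  simp only [first_sentence_py]
  rw [if_pos hstripne, hline, if_neg hne]

-- the head case: a nonempty first comment is the returned sentence
theorem fs_head (c : String) (cs : List String) (fb : String) (hP : Pstr c) (hne : c ≠ "") :
    first_sentence_py (PySem.Str.join "\n" (c :: cs)) fb = PySem.Str.slice c none (some 300) := by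
  match cs with
  | [] => exact fs_core _ c [] fb hP hne (by rw [join_toList_single, List.append_nil]) (Or.inl rfl)
  | c2 :: cs' => exact fs_core _ c _ fb hP hne (join_toList_cons c c2 cs') (Or.inr ⟨_, rfl⟩)

-- the skip case: an empty first comment does not change the sentence
theorem fs_skip (cs : List String) (fb : String) (hcs : cs ≠ []) :
    first_sentence_py (PySem.Str.join "\n" ("" :: cs)) fb = first_sentence_py (PySem.Str.join "\n" cs) fb := by
  match cs with
  | c2 :: cs' =>
    apply fs_congr
    have h1 : (PySem.Str.join "\n" ("" :: c2 :: cs')).toList = '\n' :: (PySem.Str.join "\n" (c2 :: cs')).toList := by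
      rw [join_toList_cons]; rfl
    have h2 : PySem.Chars.strip ('\n' :: (PySem.Str.join "\n" (c2 :: cs')).toList) =
        PySem.Chars.strip (PySem.Str.join "\n" (c2 :: cs')).toList := by
      show PySem.Chars.rstrip (PySem.Chars.lstrip _) = PySem.Chars.rstrip (PySem.Chars.lstrip _)
      have h3 : PySem.Chars.lstrip ('\n' :: (PySem.Str.join "\n" (c2 :: cs')).toList) =
          PySem.Chars.lstrip (PySem.Str.join "\n" (c2 :: cs')).toList := by
        simp [PySem.Chars.lstrip, show PySem.Chars.isspace '\n' = true from rfl]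
      rw [h3]
    show String.ofList (PySem.Chars.strip (PySem.Str.join "\n" ("" :: c2 :: cs')).toList) =
      String.ofList (PySem.Chars.strip (PySem.Str.join "\n" (c2 :: cs')).toList)
    rw [h1, h2]

-- the common list-level value both programs compute
def fAux : List String → String → String
  | [], fb => fb
  | c :: cs, fb => if c ≠ "" then PySem.Str.slice c none (some 300) else fAux cs fb

theorem g_eq_f (cs : List String) (fb : String) (h : ∀ c ∈ cs, Pstr c) :
    (if cs ≠ [] then first_sentence_py (PySem.Str.join "\n" cs) fb else fb) = fAux cs fb := by
  induction cs with
  | nil => simp [fAux]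
  | cons c cs ih =>
    rw [if_pos (by simp)]
    by_cases hc : c = ""
    · subst hc
      rw [show fAux ("" :: cs) fb = fAux cs fb by simp [fAux]]
      match cs with
      | [] =>
        show first_sentence_py (PySem.Str.join "\n" [""]) fb = fAux [] fb
        have : PySem.Str.join "\n" [""] = "" := by
          show String.ofList (PySem.Chars.join "\n".toList (List.map String.toList [""])) = ""
          simp [PySem.Chars.join_singleton]
        rw [this]
        rfl
      | c2 :: cs' =>
        rw [fs_skip (c2 :: cs') fb (by simp)]
        rw [← ih (fun x hx => h x (List.mem_cons_of_mem _ hx))]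
        rw [if_pos (by simp)]
    · rw [fs_head c cs fb (h c (List.mem_cons_self ..)) hc]
      simp [fAux, hc]

-- B's recursion computes fAux of the same comments list
theorem bDoc_eq_fAux (ls : List String) (fb : String) : ∀ inBlock : Bool,
    bDoc ls inBlock fb =
      fAux ((if inBlock then ls.takeWhile (fun l => PySem.Str.startswith (PySem.Str.strip l) "#")
        else (ls.dropWhile (fun l => PySem.Str.strip l == "")).takeWhile
          (fun l => PySem.Str.startswith (PySem.Str.strip l) "#")).map
        (fun l => PySem.Str.strip (pyLstripHash (PySem.Str.strip l)))) fb := by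
  induction ls with
  | nil => intro inBlock; cases inBlock <;> simp [bDoc, fAux]
  | cons l rest ih =>
    intro inBlock
    by_cases hp : PySem.Str.startswith (PySem.Str.strip l) "#" = true
    · have hblank := strip_ne_empty_of_startswith_hash l hp
      have hlist : (if inBlock then (l :: rest).takeWhile (fun l => PySem.Str.startswith (PySem.Str.strip l) "#")
          else ((l :: rest).dropWhile (fun l => PySem.Str.strip l == "")).takeWhile
            (fun l => PySem.Str.startswith (PySem.Str.strip l) "#")) =
          l :: rest.takeWhile (fun l => PySem.Str.startswith (PySem.Str.strip l) "#") := by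
        cases inBlock
        · rw [if_neg (by simp), List.dropWhile_cons, if_neg hblank, List.takeWhile_cons, if_pos hp]
        · rw [if_pos rfl, List.takeWhile_cons, if_pos hp]
      rw [hlist, List.map_cons]
      by_cases hcont : PySem.Str.strip (pyLstripHash (PySem.Str.strip l)) ≠ ""
      · rw [show bDoc (l :: rest) inBlock fb = PySem.Str.slice (PySem.Str.strip (pyLstripHash (PySem.Str.strip l))) none (some 300) by
            rw [bDoc]; simp only [hp, if_pos]; rw [if_pos hcont]]
        rw [show fAux (PySem.Str.strip (pyLstripHash (PySem.Str.strip l)) :: _) fb =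
            PySem.Str.slice (PySem.Str.strip (pyLstripHash (PySem.Str.strip l))) none (some 300) by
          simp only [fAux]; rw [if_pos hcont]]
      · rw [show bDoc (l :: rest) inBlock fb = bDoc rest true fb by
            rw [bDoc]; simp only [hp, if_true]; rw [if_neg hcont]]
        rw [show fAux (PySem.Str.strip (pyLstripHash (PySem.Str.strip l)) :: _) fb =
            fAux (rest.takeWhile (fun l => PySem.Str.startswith (PySem.Str.strip l) "#") |>.map
              (fun l => PySem.Str.strip (pyLstripHash (PySem.Str.strip l)))) fb by
          simp only [fAux]; rw [if_neg hcont]]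
        have := ih true
        rw [if_pos rfl] at this
        exact this
    · cases inBlock
      · by_cases hb : (PySem.Str.strip l == "") = true
        · rw [show bDoc (l :: rest) false fb = bDoc rest false fb by
              rw [bDoc]; simp only [hp, Bool.false_eq_true, if_false]
              rw [if_neg (by simp; exact eq_of_beq hb)]]
          rw [if_neg (by simp), List.dropWhile_cons, if_pos hb]
          have := ih false
          rw [if_neg (by simp)] at this
          exact this
        · rw [show bDoc (l :: rest) false fb = fb by
              rw [bDoc]; simp only [hp, Bool.false_eq_true, if_false]
              rw [if_pos (by simp; intro hx; exact absurd (by simp [hx]) hb)]]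
          rw [if_neg (by simp), List.dropWhile_cons, if_neg hb, List.takeWhile_cons, if_neg hp]
          rfl
      · rw [show bDoc (l :: rest) true fb = fb by
            rw [bDoc]; simp only [hp, Bool.false_eq_true, if_false]
            rw [if_pos (by simp)]]
        rw [if_pos rfl, List.takeWhile_cons, if_neg hp]
        rfl

-- every element of the comments list satisfies Pstr
theorem comments_Pstr (text : String) :
    ∀ c ∈ (((match PySem.Str.splitlines text with
        | [] => []
        | l0 :: rest => if PySem.Str.startswith (PySem.Str.strip l0) "#!" then rest else l0 :: rest
       : List String).dropWhile (fun l => PySem.Str.strip l == "")).takeWhile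
        (fun l => PySem.Str.startswith (PySem.Str.strip l) "#")).map
      (fun l => PySem.Str.strip (pyLstripHash (PySem.Str.strip l))), Pstr c := by
  intro c hc
  obtain ⟨l, hl, rfl⟩ := List.mem_map.mp hc
  have hl1 : l ∈ (match PySem.Str.splitlines text with
      | [] => []
      | l0 :: rest => if PySem.Str.startswith (PySem.Str.strip l0) "#!" then rest else l0 :: rest
     : List String) :=
    (List.dropWhile_sublist _).subset ((List.takeWhile_sublist _).subset hl)
  have hl2 : l ∈ PySem.Str.splitlines text := by
    revert hl1
    match PySem.Str.splitlines text with
    | [] => intro h; exact absurd h (by simp)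
    | l0 :: rest =>
      intro h
      have h' : l ∈ (if PySem.Str.startswith (PySem.Str.strip l0) "#!" = true then rest else l0 :: rest) := h
      by_cases hs : PySem.Str.startswith (PySem.Str.strip l0) "#!" = true
      · rw [if_pos hs] at h'; exact List.mem_cons_of_mem _ h'
      · rw [if_neg hs] at h'; exact h'
  obtain ⟨p, hp, rfl⟩ := List.mem_map.mp hl2
  apply Pstr_content
  rw [String.toList_ofList]
  exact splitlines_nobreak text.toList p hp

-- ===== VERDICT (by name: the statement is the Claim_ definition above) =====
theorem extract_shell_doc_py_spec : Claim_equal_extract_shell_doc_py := by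
  intro text fallback _
  unfold Spec_extract_shell_doc_py extract_shell_doc_py extract_shell_doc_py_alt
  show (if aLoop (PySem.Str.splitlines text) 0 [] ≠ [] then
      first_sentence_py (PySem.Str.join "\n" (aLoop (PySem.Str.splitlines text) 0 [])) fallback
    else fallback) =
    bDoc (match PySem.Str.splitlines text with
      | [] => []
      | l0 :: rest => if PySem.Str.startswith (PySem.Str.strip l0) "#!" then rest else l0 :: rest)
      false fallback
  rw [aLoop_eq_alt]
  rw [g_eq_f _ fallback (comments_Pstr text)]
  rw [bDoc_eq_fAux _ fallback false]
  rw [if_neg (by simp)]
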